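-- pv_equiv track=rewrite | github.com/WSUCptSCapstone-Fall2022Spring2023/psychology-matlabml | pythonProject/Preprocessing_Module_Continuous_Classifier.py | __noiseArtifactsFilter
-- ===== SOURCE A (Python) =====
-- def __noiseArtifactsFilter(sig, artifactThreshold, onset, offset):
--     """Cleans the data for noise artifacts created by interference by sources like the rat bashing its head against the enclosure wall.
--     Filter is performed by scanning the signal array for values greater than the threshold, then removing all values a fraction of a second before and after that value."""
--
--     rangesToRemove = []  # make list of ranges to remove after searching
--
--     # iterate through array
--     endOfArray = len(sig)-1
--     for i in range(len(sig)):
--         if sig[i] >= artifactThreshold:  # if a value is greater than the threshold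
--             if i-onset < 0:  # check for out-of-bounds-ing
--                 rangesToRemove.append([0, i + offset])  # add range to be removed to array
--             elif i+offset > endOfArray:
--                 rangesToRemove.append([i-onset, endOfArray])  # add range to be removed to array
--             elif i-onset < 0 and i+offset > endOfArray:
--                 rangesToRemove.append([0, endOfArray])
--             else:
--                 rangesToRemove.append([i-onset, i+offset])  # add range to be removed to array
--
--     for r in rangesToRemove:
--         for i in range(r[0], r[1] + 1):
--             sig[i] = 'erase'
--
--     cleanSig = []
--     for val in sig:
--         if val != 'erase':
--             cleanSig.append(val)
--
--
--
--     return cleanSig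
-- ===== SOURCE B (Python) =====
-- def __noiseArtifactsFilter(sig, artifactThreshold, onset, offset):
--     """Difference array over the clamped removal intervals, then a single
--     prefix-sum pass emitting the values whose coverage count is zero.
--     (Unlike the original, this does not mutate sig in place.)"""
--     n = len(sig)
--     diff = [0] * (n + 1)
--     for i, v in enumerate(sig):
--         if v >= artifactThreshold:
--             lo = i - onset
--             if lo < 0:
--                 lo = 0
--             hi = i + offset
--             if hi > n - 1:
--                 hi = n - 1
--             if lo <= hi:
--                 diff[lo] += 1
--                 diff[hi + 1] -= 1
--     clean = []
--     depth = 0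
--     for i, v in enumerate(sig):
--         depth += diff[i]
--         if depth == 0:
--             clean.append(v)
--     return clean
-- ===== Notes on version B (the rewrite author's own statement) =====
-- stated objective: alternative
-- what changed: Replaces A's mark-every-index-per-artifact pass (writes of an 'erase' sentinel over each removal window, then a filter) by a difference array over the clamped removal intervals and a single prefix-sum pass that emits the values with coverage count zero; B also does not mutate sig in place, while A overwrites it with sentinels.
-- outside the precondition, e.g. on __noiseArtifactsFilter([5], 0, 1, 1): A raises IndexError, B returns []
import Mathlib
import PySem

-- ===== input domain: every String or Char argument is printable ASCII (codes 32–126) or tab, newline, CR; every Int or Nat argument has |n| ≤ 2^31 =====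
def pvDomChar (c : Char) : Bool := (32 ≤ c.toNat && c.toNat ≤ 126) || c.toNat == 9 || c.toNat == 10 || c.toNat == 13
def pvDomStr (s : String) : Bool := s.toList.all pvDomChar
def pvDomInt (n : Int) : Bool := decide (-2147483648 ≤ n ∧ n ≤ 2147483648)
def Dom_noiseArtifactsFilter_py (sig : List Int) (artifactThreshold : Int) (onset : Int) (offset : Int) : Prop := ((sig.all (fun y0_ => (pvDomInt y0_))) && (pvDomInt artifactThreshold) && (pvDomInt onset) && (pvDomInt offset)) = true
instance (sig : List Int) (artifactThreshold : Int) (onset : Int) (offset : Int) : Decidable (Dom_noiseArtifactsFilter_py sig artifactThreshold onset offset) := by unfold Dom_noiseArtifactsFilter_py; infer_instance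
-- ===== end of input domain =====

-- B replaces A's per-artifact index-marking pass (sentinel writes, then a filter) by a
-- difference array over the clamped removal intervals and one prefix-sum pass.
-- A mutates sig in place (overwrites removed cells with a sentinel); B does not —
-- the equivalence proved here is about the return value only.

-- ===== PORT A =====
-- Python stores the string 'erase' into the int list; ported as Option Int with
-- none = 'erase' (exact: an int never equals 'erase', and only erased cells hold it).
def noiseArtifactsFilter_py (sig : List Int) (artifactThreshold : Int) (onset : Int) (offset : Int) : List Int :=
  let endOfArray : Int := (sig.length : Int) - 1
  let rangesToRemove : List (Int × Int) :=
    (PySem.List.pyRange 0 (sig.length : Int) 1).foldl (fun acc i =>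
      if artifactThreshold ≤ PySem.List.pyGetD sig i 0 then
        if i - onset < 0 then acc ++ [(0, i + offset)]
        else if endOfArray < i + offset then acc ++ [(i - onset, endOfArray)]
        else if i - onset < 0 ∧ endOfArray < i + offset then acc ++ [(0, endOfArray)]
        else acc ++ [(i - onset, i + offset)]
      else acc) []
  let marked : List (Option Int) :=
    rangesToRemove.foldl (fun s r =>
      (PySem.List.pyRange r.1 (r.2 + 1) 1).foldl
        (fun s i => PySem.List.pySetD s i none) s)
      (sig.map some)
  marked.foldl (fun acc val => match val with
    | some v => acc ++ [v]
    | none => acc) []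

-- ===== PORT B =====
def noiseArtifactsFilter_py_alt (sig : List Int) (artifactThreshold : Int) (onset : Int) (offset : Int) : List Int :=
  let n : Int := (sig.length : Int)
  let diff : List Int :=
    (PySem.List.enumerate sig 0).foldl (fun d p =>
      if artifactThreshold ≤ p.2 then
        let lo : Int := if p.1 - onset < 0 then 0 else p.1 - onset
        let hi : Int := if n - 1 < p.1 + offset then n - 1 else p.1 + offset
        if lo ≤ hi then
          let d1 := PySem.List.pySetD d lo (PySem.List.pyGetD d lo 0 + 1)
          PySem.List.pySetD d1 (hi + 1) (PySem.List.pyGetD d1 (hi + 1) 0 - 1)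
        else d
      else d) (List.replicate (sig.length + 1) 0)
  ((PySem.List.enumerate sig 0).foldl (fun (st : Int × List Int) p =>
      let depth := st.1 + PySem.List.pyGetD diff p.1 0
      (depth, if depth = 0 then st.2 ++ [p.2] else st.2)) (0, [])).2

-- ===== PRECONDITION & SPEC =====
-- Pre_ excludes exactly the inputs on which A raises IndexError: an artifact index i
-- with i-onset < 0 and i+offset > len(sig)-1 makes A's erase loop write past the end.
def Pre_noiseArtifactsFilter_py (sig : List Int) (artifactThreshold : Int) (onset : Int) (offset : Int) : Prop :=
  ∀ k : Nat, k < sig.length → artifactThreshold ≤ sig.getD k 0 →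
    ¬ ((k : Int) - onset < 0 ∧ (sig.length : Int) - 1 < (k : Int) + offset)
instance (sig : List Int) (artifactThreshold : Int) (onset : Int) (offset : Int) : Decidable (Pre_noiseArtifactsFilter_py sig artifactThreshold onset offset) := by unfold Pre_noiseArtifactsFilter_py; infer_instance

def pvWitness_noiseArtifactsFilter_py : List Int × Int × Int × Int := ([1, 9, 2, 0, 9, 3], 5, 1, 1)

def Spec_noiseArtifactsFilter_py (sig : List Int) (artifactThreshold : Int) (onset : Int) (offset : Int) (out : List Int) : Prop := out = noiseArtifactsFilter_py_alt sig artifactThreshold onset offset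
instance (sig : List Int) (artifactThreshold : Int) (onset : Int) (offset : Int) (out : List Int) : Decidable (Spec_noiseArtifactsFilter_py sig artifactThreshold onset offset out) := by unfold Spec_noiseArtifactsFilter_py; infer_instance

-- ===== CLAIM (what is proved, stated in full; the proofs are below) =====
def Claim_equal_noiseArtifactsFilter_py : Prop := ∀ (sig : List Int) (artifactThreshold : Int) (onset : Int) (offset : Int), Dom_noiseArtifactsFilter_py sig artifactThreshold onset offset → Pre_noiseArtifactsFilter_py sig artifactThreshold onset offset → Spec_noiseArtifactsFilter_py sig artifactThreshold onset offset (noiseArtifactsFilter_py sig artifactThreshold onset offset)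

-- ===== LEMMAS AND PROOFS =====

-- prefix sum of the first j cells of the difference array
def psum (d : List Int) (j : Nat) : Int := (d.take j).sum

-- "position k is covered by the removal window of some artifact"
def covQ (sig : List Int) (th on : Int) (off : Int) (k : Nat) : Prop :=
  ∃ i ∈ List.range sig.length,
    th ≤ sig.getD i 0 ∧ (i : Int) - on ≤ (k : Int) ∧ (k : Int) ≤ (i : Int) + off

-- boolean form of covQ
def covb (sig : List Int) (th on : Int) (off : Int) (k : Nat) : Bool :=
  (List.range sig.length).any
    (fun i => decide (th ≤ sig.getD i 0) && decide ((i : Int) - on ≤ (k : Int)) && decide ((k : Int) ≤ (i : Int) + off))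

-- the common normal form both ports are reduced to
def canon (sig : List Int) (th on : Int) (off : Int) : List Int :=
  (List.range sig.length).filterMap
    (fun k => if covb sig th on off k then none else some (sig.getD k 0))

lemma covb_iff (sig : List Int) (th on off : Int) (k : Nat) :
    covb sig th on off k = true ↔ covQ sig th on off k := by
  simp [covb, covQ, and_assoc]

-- A's per-iteration contribution to rangesToRemove
def gA (th on off nE : Int) (sig : List Int) (i : Int) : List (Int × Int) :=
  if th ≤ PySem.List.pyGetD sig i 0 then
    (if i - on < 0 then [(0, i + off)]
     else if nE < i + off then [(i - on, nE)]
     else if i - on < 0 ∧ nE < i + off then [(0, nE)]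
     else [(i - on, i + off)])
  else []

-- clamped form of the same contribution (equal to gA under Pre_)
def gC (th on off nE : Int) (sig : List Int) (i : Int) : List (Int × Int) :=
  if th ≤ PySem.List.pyGetD sig i 0 then [(max 0 (i - on), min nE (i + off))] else []

-- one interval's ±1 contribution to psum at cut j
def contribB (th on off nE : Int) (j : Nat) (p : Int × Int) : Bool :=
  decide (th ≤ p.2) && decide (max 0 (p.1 - on) < (j : Int)) && decide ((j : Int) ≤ min nE (p.1 + off) + 1)

def contrib (th on off nE : Int) (p : Int × Int) (j : Nat) : Int :=
  if contribB th on off nE j p then 1 else 0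

lemma psum_succ (d : List Int) (s : Nat) : psum d (s + 1) = psum d s + d.getD s 0 := by
  unfold psum
  rw [List.take_add_one, List.sum_append]
  rcases h : d[s]? with _ | v
  · simp [List.getD, h]
  · simp [List.getD, h]

lemma sum_take_set (d : List Int) (m j : Nat) (v : Int) :
    ((d.set m v).take j).sum = (d.take j).sum + (if m < j ∧ m < d.length then v - d.getD m 0 else 0) := by
  induction d generalizing m j with
  | nil => simp
  | cons x t ih =>
    cases m with
    | zero =>
      cases j with
      | zero => simp
      | succ j => simp [List.getD]; ring
    | succ m =>
      cases j with
      | zero => simp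
      | succ j =>
        simp only [List.set_cons_succ, List.take_succ_cons, List.sum_cons, ih m j,
          List.length_cons, List.getD_cons_succ]
        have : (m < j ∧ m < t.length) ↔ (m + 1 < j + 1 ∧ m + 1 < t.length + 1) := by omega
        rw [if_congr this rfl rfl]
        ring

lemma psum_replicate (n j : Nat) : psum (List.replicate n (0 : Int)) j = 0 := by
  unfold psum
  rw [List.take_replicate]
  simp

-- B's difference-array update for one enumerated element
def stepB (th on off nI : Int) (d : List Int) (p : Int × Int) : List Int :=
  if th ≤ p.2 then
    let lo : Int := if p.1 - on < 0 then 0 else p.1 - on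
    let hi : Int := if nI - 1 < p.1 + off then nI - 1 else p.1 + off
    if lo ≤ hi then
      let d1 := PySem.List.pySetD d lo (PySem.List.pyGetD d lo 0 + 1)
      PySem.List.pySetD d1 (hi + 1) (PySem.List.pyGetD d1 (hi + 1) 0 - 1)
    else d
  else d

lemma stepB_length (th on off nI : Int) (d : List Int) (p : Int × Int) :
    (stepB th on off nI d p).length = d.length := by
  simp only [stepB]
  split_ifs <;> simp [PySem.List.length_pySetD]

lemma contrib_eq (th on off nE : Int) (p : Int × Int) (j : Nat) :
    contrib th on off nE p j
      = if th ≤ p.2 ∧ max 0 (p.1 - on) < (j : Int) ∧ (j : Int) ≤ min nE (p.1 + off) + 1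
        then 1 else 0 := by
  simp [contrib, contribB, and_assoc]

lemma stepB_psum (th on off nI : Int) (d : List Int) (hd : d.length = nI.toNat + 1)
    (p : Int × Int) (j : Nat) :
    psum (stepB th on off nI d p) j = psum d j + contrib th on off (nI - 1) p j := by
  have getDeq : ∀ (e : List Int) (i : Int), 0 ≤ i → PySem.List.pyGetD e i 0 = e.getD i.toNat 0 := by
    intro e i h
    conv_lhs => rw [← Int.toNat_of_nonneg h]
    rw [PySem.List.pyGetD_natCast]
  have hlo : (if p.1 - on < 0 then (0:Int) else p.1 - on) = max 0 (p.1 - on) := by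
    split_ifs <;> omega
  have hhi : (if nI - 1 < p.1 + off then nI - 1 else p.1 + off) = min (nI - 1) (p.1 + off) := by
    split_ifs <;> omega
  simp only [stepB, hlo, hhi]
  by_cases hth : th ≤ p.2
  · simp only [hth, if_true]
    by_cases hlh : max 0 (p.1 - on) ≤ min (nI - 1) (p.1 + off)
    · simp only [hlh, if_pos]
      have h0lo : (0:Int) ≤ max 0 (p.1 - on) := le_max_left _ _
      have h0hi : (0:Int) ≤ min (nI - 1) (p.1 + off) + 1 := by omega
      rw [PySem.List.pySetD_of_nonneg _ _ h0lo, getDeq _ _ h0lo,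
          PySem.List.pySetD_of_nonneg _ _ h0hi, getDeq _ _ h0hi]
      unfold psum
      rw [sum_take_set, sum_take_set, contrib_eq]
      simp only [List.length_set]
      split_ifs <;> omega
    · rw [if_neg hlh, contrib_eq, if_neg (by intro h; exact hlh (by omega))]
      ring
  · simp [hth, contrib, contribB]

lemma foldB_psum (th on off nI : Int) (L : List (Int × Int)) (d : List Int)
    (hd : d.length = nI.toNat + 1) (j : Nat) :
    psum (L.foldl (stepB th on off nI) d) j
      = psum d j + (L.map (fun p => contrib th on off (nI - 1) p j)).sum := by
  induction L generalizing d with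
  | nil => simp
  | cons p L ih =>
    simp only [List.foldl_cons, List.map_cons, List.sum_cons]
    rw [ih _ (by rw [stepB_length]; exact hd), stepB_psum th on off nI d hd p j]
    ring

lemma loop2 (dif : List Int) (xs : List Int) : ∀ (s : Nat) (acc : List Int),
    ((PySem.List.enumerate xs ((s : Nat) : Int)).foldl
      (fun (st : Int × List Int) p =>
        let depth := st.1 + PySem.List.pyGetD dif p.1 0
        (depth, if depth = 0 then st.2 ++ [p.2] else st.2)) (psum dif s, acc)).2
    = acc ++ (List.range xs.length).filterMap
        (fun m => if psum dif (s + m + 1) = 0 then some (xs.getD m 0) else none) := by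
  induction xs with
  | nil => intro s acc; simp [PySem.List.enumerate_nil]
  | cons x t ih =>
    intro s acc
    rw [PySem.List.enumerate_cons]
    simp only [List.foldl_cons]
    have hcast : ((s : Int) + 1) = ((s + 1 : Nat) : Int) := by push_cast; ring
    have hdep : psum dif s + PySem.List.pyGetD dif ((s : Nat) : Int) 0 = psum dif (s + 1) := by
      rw [PySem.List.pyGetD_natCast, psum_succ]
    rw [hdep, hcast, ih (s + 1) _]
    have hshift : (List.range t.length).filterMap
          (fun m => if psum dif (s + 1 + m + 1) = 0 then some (t.getD m 0) else none)
        = (List.range t.length).filterMap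
          (fun m => if psum dif (s + (m + 1) + 1) = 0 then some ((x :: t).getD (m + 1) 0) else none) := by
      refine List.filterMap_congr ?_
      intro m hm
      have harr : s + 1 + m + 1 = s + (m + 1) + 1 := by omega
      rw [harr]
      rfl
    rw [hshift, List.length_cons, List.range_succ_eq_map, List.filterMap_cons, List.filterMap_map]
    by_cases hz : psum dif (s + 1) = 0
    · simp only [hz, if_pos, List.getD_cons_zero, Nat.add_zero]
      simp
    · simp only [hz, List.getD_cons_zero, Nat.add_zero]
      simp


lemma flatMap_toList_eq_filterMap {α β : Type} (f : α → Option β) (l : List α) :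
    l.flatMap (fun a => (f a).toList) = l.filterMap f := by
  induction l with
  | nil => rfl
  | cons x t ih =>
    rcases h : f x with _ | v <;> simp [List.flatMap_cons, h, ih]

lemma markRange_length : ∀ (L : List Int) (s : List (Option Int)),
    (L.foldl (fun s i => PySem.List.pySetD s i none) s).length = s.length := by
  intro L
  induction L with
  | nil => intro s; rfl
  | cons i L ih => intro s; rw [List.foldl_cons, ih, PySem.List.length_pySetD]

lemma markRange_get : ∀ (m : Nat) (s : List (Option Int)) (lo hi : Int), 0 ≤ lo →
    (hi + 1 - lo).toNat = m → ∀ k : Nat,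
    ((PySem.List.pyRange lo (hi + 1) 1).foldl (fun s i => PySem.List.pySetD s i none) s)[k]?
      = if lo ≤ (k : Int) ∧ (k : Int) ≤ hi ∧ k < s.length then some none else s[k]? := by
  intro m
  induction m with
  | zero =>
    intro s lo hi hlo hm k
    rw [PySem.List.pyRange_one_eq_nil (by omega)]
    rw [List.foldl_nil, if_neg (by omega)]
  | succ m ih =>
    intro s lo hi hlo hm k
    rw [PySem.List.pyRange_one_cons (by omega)]
    rw [List.foldl_cons, ih _ (lo + 1) hi (by omega) (by omega) k]
    rw [PySem.List.pySetD_of_nonneg _ _ hlo, List.getElem?_set]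
    simp only [List.length_set]
    split_ifs <;>
      first
        | rfl
        | (exfalso; omega)
        | exact (List.getElem?_eq_none (by omega))
        | exact (List.getElem?_eq_none (by omega)).symm

lemma markAll_get : ∀ (R : List (Int × Int)) (s : List (Option Int)), (∀ r ∈ R, 0 ≤ r.1) →
    ∀ k : Nat,
    (R.foldl (fun s r =>
        (PySem.List.pyRange r.1 (r.2 + 1) 1).foldl (fun s i => PySem.List.pySetD s i none) s) s)[k]?
      = if (∃ r ∈ R, r.1 ≤ (k : Int) ∧ (k : Int) ≤ r.2) ∧ k < s.length then some none
        else s[k]? := by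
  intro R
  induction R with
  | nil => intro s _ k; simp
  | cons r R ih =>
    intro s hR k
    rw [List.foldl_cons, ih _ (fun r' hr' => hR r' (List.mem_cons_of_mem _ hr')) k]
    rw [markRange_length, markRange_get ((r.2 + 1 - r.1).toNat) s r.1 r.2 (hR r List.mem_cons_self) rfl k]
    have hc : ((∃ x ∈ r :: R, x.1 ≤ (k : Int) ∧ (k : Int) ≤ x.2) ∧ k < s.length)
        ↔ (((∃ x ∈ R, x.1 ≤ (k : Int) ∧ (k : Int) ≤ x.2) ∧ k < s.length)
            ∨ (r.1 ≤ (k : Int) ∧ (k : Int) ≤ r.2 ∧ k < s.length)) := by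
      simp only [List.mem_cons]
      constructor
      · rintro ⟨⟨x, hx | hx, h1, h2⟩, hk⟩
        · right; subst hx; exact ⟨h1, h2, hk⟩
        · left; exact ⟨⟨x, hx, h1, h2⟩, hk⟩
      · rintro (⟨⟨x, hx, h1, h2⟩, hk⟩ | ⟨h1, h2, hk⟩)
        · exact ⟨⟨x, Or.inr hx, h1, h2⟩, hk⟩
        · exact ⟨⟨r, Or.inl rfl, h1, h2⟩, hk⟩
    rw [if_congr hc rfl rfl]
    by_cases hc1 : (∃ x ∈ R, x.1 ≤ (k : Int) ∧ (k : Int) ≤ x.2) ∧ k < s.length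
    · rw [if_pos hc1, if_pos (Or.inl hc1)]
    · by_cases hc2 : r.1 ≤ (k : Int) ∧ (k : Int) ≤ r.2 ∧ k < s.length
      · rw [if_neg hc1, if_pos hc2, if_pos (Or.inr hc2)]
      · rw [if_neg hc1, if_neg hc2, if_neg (by rintro (h | h); exacts [hc1 h, hc2 h])]

lemma gA_eq_gC (sig : List Int) (th on off : Int)
    (hpre : Pre_noiseArtifactsFilter_py sig th on off) :
    ∀ i ∈ PySem.List.pyRange 0 (sig.length : Int) 1,
      gA th on off ((sig.length : Int) - 1) sig i = gC th on off ((sig.length : Int) - 1) sig i := by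
  intro i hi
  rw [PySem.List.mem_pyRange_one] at hi
  have hk : i = ((i.toNat : Nat) : Int) := by omega
  have hget : PySem.List.pyGetD sig i 0 = sig.getD i.toNat 0 := by
    conv_lhs => rw [hk]
    rw [PySem.List.pyGetD_natCast]
  unfold gA gC
  rw [hget]
  by_cases hth : th ≤ sig.getD i.toNat 0
  · have hp := hpre i.toNat (by omega) hth
    rw [← hk] at hp
    rw [if_pos hth, if_pos hth]
    split_ifs <;>
      (simp only [List.cons.injEq, Prod.mk.injEq, and_true]; constructor <;> omega)
  · rw [if_neg hth, if_neg hth]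

lemma cov_iff (sig : List Int) (th on off : Int) (k : Nat) (hk : k < sig.length) :
    ((∃ r ∈ (PySem.List.pyRange 0 (sig.length : Int) 1).flatMap
          (gC th on off ((sig.length : Int) - 1) sig),
        r.1 ≤ (k : Int) ∧ (k : Int) ≤ r.2))
      ↔ covQ sig th on off k := by
  constructor
  · rintro ⟨r, hr, h1, h2⟩
    rw [List.mem_flatMap] at hr
    obtain ⟨i, hi, hri⟩ := hr
    rw [PySem.List.mem_pyRange_one] at hi
    have hgi : PySem.List.pyGetD sig i 0 = sig.getD i.toNat 0 := by
      conv_lhs => rw [show i = ((i.toNat : Nat) : Int) by omega]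
      rw [PySem.List.pyGetD_natCast]
    unfold gC at hri
    rw [hgi] at hri
    by_cases hth : th ≤ sig.getD i.toNat 0
    · rw [if_pos hth] at hri
      simp only [List.mem_singleton] at hri
      subst hri
      refine ⟨i.toNat, ?_, hth, ?_, ?_⟩
      · rw [List.mem_range]; omega
      · omega
      · omega
    · rw [if_neg hth] at hri; simp at hri
  · rintro ⟨i, hiR, hth, h1, h2⟩
    rw [List.mem_range] at hiR
    refine ⟨(max 0 ((i : Int) - on), min ((sig.length : Int) - 1) ((i : Int) + off)), ?_, by omega, by omega⟩
    rw [List.mem_flatMap]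
    refine ⟨(i : Int), ?_, ?_⟩
    · rw [PySem.List.mem_pyRange_one]; omega
    · unfold gC
      rw [PySem.List.pyGetD_natCast, if_pos hth]
      simp

lemma LA (sig : List Int) (th on off : Int)
    (hpre : Pre_noiseArtifactsFilter_py sig th on off) :
    noiseArtifactsFilter_py sig th on off = canon sig th on off := by
  simp only [noiseArtifactsFilter_py]
  -- (1) the collection loop is a flatMap of per-index clamped intervals
  have hstep : ∀ (acc : List (Int × Int)), ∀ i ∈ PySem.List.pyRange 0 (sig.length : Int) 1,
      (if th ≤ PySem.List.pyGetD sig i 0 then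
        if i - on < 0 then acc ++ [((0 : Int), i + off)]
        else if (sig.length : Int) - 1 < i + off then acc ++ [(i - on, (sig.length : Int) - 1)]
        else if i - on < 0 ∧ (sig.length : Int) - 1 < i + off then
          acc ++ [((0 : Int), (sig.length : Int) - 1)]
        else acc ++ [(i - on, i + off)]
      else acc) = acc ++ gC th on off ((sig.length : Int) - 1) sig i := by
    intro acc i hi
    rw [← gA_eq_gC sig th on off hpre i hi]
    unfold gA
    split_ifs <;> simp
  rw [PySem.List.foldl_congr_mem _ _ _ _ hstep, PySem.List.foldl_append_eq_flatMap,
      List.nil_append]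
  -- (2) the erase loops mark exactly the covered positions
  have h0 : ∀ r ∈ (PySem.List.pyRange 0 (sig.length : Int) 1).flatMap
      (gC th on off ((sig.length : Int) - 1) sig), 0 ≤ r.1 := by
    intro r hr
    rw [List.mem_flatMap] at hr
    obtain ⟨i, _, hri⟩ := hr
    unfold gC at hri
    split_ifs at hri <;> simp at hri
    subst hri
    exact le_max_left _ _
  have hM : (((PySem.List.pyRange 0 (sig.length : Int) 1).flatMap
        (gC th on off ((sig.length : Int) - 1) sig)).foldl
        (fun s r => (PySem.List.pyRange r.1 (r.2 + 1) 1).foldl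
          (fun s i => PySem.List.pySetD s i none) s) (sig.map some))
      = (List.range sig.length).map
          (fun k => if covb sig th on off k then none else some (sig.getD k 0)) := by
    apply List.ext_getElem?
    intro k
    rw [markAll_get _ _ h0 k]
    by_cases hk : k < sig.length
    · have hrhs : (List.map (fun k => if covb sig th on off k = true then none
            else some (sig.getD k 0)) (List.range sig.length))[k]?
          = some (if covb sig th on off k = true then none else some (sig.getD k 0)) := by
        rw [List.getElem?_map, List.getElem?_range hk, Option.map_some]
      rw [hrhs]
      by_cases hcov : covQ sig th on off k
      · rw [if_pos ⟨(cov_iff sig th on off k hk).mpr hcov, by rw [List.length_map]; exact hk⟩,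
            if_pos ((covb_iff sig th on off k).mpr hcov)]
      · rw [if_neg (fun hx => hcov ((cov_iff sig th on off k hk).mp hx.1)),
            if_neg (fun hx => hcov ((covb_iff sig th on off k).mp hx)),
            List.getElem?_map, List.getElem?_eq_getElem hk, Option.map_some,
            List.getD_eq_getElem?_getD, List.getElem?_eq_getElem hk]
        rfl
    · have h1 : (List.map some sig).length ≤ k := by simp; omega
      have h2 : (List.map (fun k => if covb sig th on off k = true then none
          else some (sig.getD k 0)) (List.range sig.length)).length ≤ k := by simp; omega
      rw [if_neg (fun hx => hk (by simpa using hx.2)), List.getElem?_eq_none h1,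
          List.getElem?_eq_none h2]
  rw [hM]
  -- (3) the final collection pass is a filterMap
  have hmatch : (fun (acc : List Int) (val : Option Int) =>
      match val with
      | some v => acc ++ [v]
      | none => acc) = fun acc val => acc ++ val.toList := by
    funext acc val
    cases val <;> simp
  rw [hmatch, PySem.List.foldl_append_eq_flatMap, List.nil_append, List.flatMap_map,
      flatMap_toList_eq_filterMap]
  rfl

lemma LB (sig : List Int) (th on off : Int) :
    noiseArtifactsFilter_py_alt sig th on off = canon sig th on off := by
  have key := loop2 ((PySem.List.enumerate sig 0).foldl (stepB th on off (sig.length : Int))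
      (List.replicate (sig.length + 1) 0)) sig 0 []
  refine Eq.trans key ?_
  rw [List.nil_append]
  unfold canon
  refine List.filterMap_congr ?_
  intro m hm
  rw [List.mem_range] at hm
  have hlen : (List.replicate (sig.length + 1) (0 : Int)).length = ((sig.length : Int)).toNat + 1 := by
    simp
  have hps := foldB_psum th on off (sig.length : Int) (PySem.List.enumerate sig 0) _ hlen (m + 1)
  rw [psum_replicate] at hps
  have hcnt : ((PySem.List.enumerate sig 0).map
        (fun p => contrib th on off ((sig.length : Int) - 1) p (m + 1))).sum
      = (((PySem.List.enumerate sig 0).countP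
          (contribB th on off ((sig.length : Int) - 1) (m + 1))) : Int) := by
    rw [← PySem.List.sum_map_ite_one_zero (contribB th on off ((sig.length : Int) - 1) (m + 1))
        (PySem.List.enumerate sig 0)]
    rfl
  have hzero : psum ((PySem.List.enumerate sig 0).foldl (stepB th on off (sig.length : Int))
        (List.replicate (sig.length + 1) 0)) (m + 1) = 0
      ↔ ¬ covb sig th on off m = true := by
    rw [hps, zero_add, hcnt, Int.natCast_eq_zero, List.countP_eq_zero]
    constructor
    · intro hall hcb
      rw [covb_iff] at hcb
      obtain ⟨i, hiR, hth, h1, h2⟩ := hcb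
      rw [List.mem_range] at hiR
      have hgd : sig.getD i 0 = sig[i] := by
        rw [List.getD_eq_getElem?_getD, List.getElem?_eq_getElem hiR]
        rfl
      refine hall ((0 : Int) + (i : Nat), sig[i]) ?_ ?_
      · rw [PySem.List.mem_enumerate_iff]
        exact ⟨i, hiR, rfl⟩
      · unfold contribB
        simp only [Bool.and_eq_true, decide_eq_true_eq]
        rw [hgd] at hth
        refine ⟨⟨hth, ?_⟩, ?_⟩ <;> omega
    · intro hncb p hp hcb
      rw [PySem.List.mem_enumerate_iff] at hp
      obtain ⟨i, hi, rfl⟩ := hp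
      unfold contribB at hcb
      simp only [Bool.and_eq_true, decide_eq_true_eq] at hcb
      obtain ⟨⟨hth, h1⟩, h2⟩ := hcb
      refine hncb ?_
      rw [covb_iff]
      have hgd : sig.getD i 0 = sig[i] := by
        rw [List.getD_eq_getElem?_getD, List.getElem?_eq_getElem hi]
        rfl
      refine ⟨i, by rw [List.mem_range]; exact hi, by rw [hgd]; exact hth, ?_, ?_⟩ <;> omega
  simp only [Nat.zero_add]
  by_cases hcb : covb sig th on off m = true
  · rw [if_neg (fun h0 => (hzero.mp h0) hcb), if_pos hcb]
  · rw [if_pos (hzero.mpr hcb), if_neg hcb]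

-- ===== VERDICT (by name: the statement is the Claim_ definition above) =====
theorem noiseArtifactsFilter_py_spec : Claim_equal_noiseArtifactsFilter_py := by
  intro sig th on off _ hpre
  unfold Spec_noiseArtifactsFilter_py
  rw [LA sig th on off hpre, LB sig th on off]
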